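-- pv_equiv track=rewrite | github.com/dj-lumiere/problem-solving-boj | 백준/Diamond/13727. 5차원 구사과 초콜릿/5차원 구사과 초콜릿.py | polynomial_multiply
-- ===== SOURCE A (Python) =====
-- from itertools import product
--
-- MOD = 10**9 + 7
--
-- def polynomial_multiply(target1, target2, recurrence_polynomial):
--     polynomial_order = len(target1)
--     result = [0] * (2 * polynomial_order)
--     for i, j in product(range(polynomial_order), repeat=2):
--         result[i + j] += target1[i] * target2[j] % MOD
--         result[i + j] %= MOD
--     for i, j in product(
--         range(2 * polynomial_order - 1, polynomial_order - 1, -1),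
--         range(1, polynomial_order + 1),
--     ):
--         result[i - j] += result[i] * recurrence_polynomial[j - 1] % MOD
--         result[i - j] %= MOD
--     result = result[:polynomial_order]
--     return result
-- ===== SOURCE B (Python) =====
-- MOD = 10**9 + 7
--
-- def polynomial_multiply(target1, target2, recurrence_polynomial):
--     # Fused Horner scheme in the quotient ring: never forms the length-2n
--     # convolution. state = (prefix of target1 read so far, Horner-style) * target2
--     # already reduced modulo the recurrence; each step multiplies by x (shift),
--     # folds the one overflowing coefficient back in via the recurrence, and adds
--     # a * target2.
--     n = len(target1)
--     state = [0] * n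
--     for a in reversed(target1):
--         top = state[-1]
--         state = [((state[k - 1] if k > 0 else 0)
--                   + top * recurrence_polynomial[n - 1 - k]
--                   + a * target2[k]) % MOD
--                  for k in range(n)]
--     return state
-- ===== Notes on version B (the rewrite author's own statement) =====
-- stated objective: alternative
-- what changed: A forms the full length-2n convolution with product() index-pair loops and then reduces its top n coefficients high-to-low in place; B never builds the convolution at all: it runs a fused Horner scheme in the quotient ring, keeping a single length-n reduced state that is shifted by x, has its one overflowing top coefficient folded back through the recurrence, and gets a*target2 added, once per coefficient of target1.
import Mathlib
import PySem

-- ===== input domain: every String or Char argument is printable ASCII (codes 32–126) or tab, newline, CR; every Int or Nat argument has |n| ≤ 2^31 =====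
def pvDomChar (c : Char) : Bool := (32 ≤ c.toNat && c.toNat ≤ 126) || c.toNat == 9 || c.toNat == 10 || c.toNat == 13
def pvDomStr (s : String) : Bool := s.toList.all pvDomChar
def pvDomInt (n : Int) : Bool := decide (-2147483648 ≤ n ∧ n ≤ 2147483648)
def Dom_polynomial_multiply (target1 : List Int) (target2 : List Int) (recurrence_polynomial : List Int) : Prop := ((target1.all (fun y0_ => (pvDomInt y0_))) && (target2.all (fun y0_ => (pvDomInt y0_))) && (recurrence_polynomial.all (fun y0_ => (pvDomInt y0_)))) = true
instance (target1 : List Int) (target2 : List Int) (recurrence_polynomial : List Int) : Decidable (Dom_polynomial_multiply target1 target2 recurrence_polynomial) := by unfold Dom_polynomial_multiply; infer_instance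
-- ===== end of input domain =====

-- B replaces A's convolve-then-reduce (full 2n-array, product() index loops) by a fused Horner scheme in the quotient ring: a single length-n reduced state, shifted and folded back through the recurrence once per coefficient of target1 (alternative algorithm, same asymptotic cost).


-- ===== PORT A =====
def polynomial_multiply (target1 : List Int) (target2 : List Int) (recurrence_polynomial : List Int) : List Int :=
  let n := target1.length
  let result : List Int := List.replicate (2 * n) 0
  let result := (List.range n).foldl (fun r i => (List.range n).foldl (fun r j =>
      r.set (i + j) (PySem.Int.mod (r.getD (i + j) 0 + PySem.Int.mod (target1.getD i 0 * target2.getD j 0) 1000000007) 1000000007)) r) result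
  let result := (PySem.List.pyRange (2 * (n : Int) - 1) ((n : Int) - 1) (-1)).foldl (fun r i =>
      (PySem.List.pyRange 1 ((n : Int) + 1) 1).foldl (fun r j =>
      r.set (i - j).toNat (PySem.Int.mod (r.getD (i - j).toNat 0 + PySem.Int.mod (r.getD i.toNat 0 * recurrence_polynomial.getD (j - 1).toNat 0) 1000000007) 1000000007)) r) result
  result.take n

-- ===== PORT B =====
-- Fused Horner scheme: state = (prefix of target1, Horner-style) * target2 already reduced
-- modulo the recurrence.  Python's state[-1] is the last element of the (always nonempty,
-- length-n) state inside the loop, hence state.getD (n-1) 0 is exact there.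
def polynomial_multiply_alt (target1 : List Int) (target2 : List Int) (recurrence_polynomial : List Int) : List Int :=
  let n := target1.length
  target1.reverse.foldl (fun state a =>
    let top := state.getD (n - 1) 0
    (List.range n).map (fun k =>
      PySem.Int.mod ((if 0 < k then state.getD (k - 1) 0 else 0)
        + top * recurrence_polynomial.getD (n - 1 - k) 0
        + a * target2.getD k 0) 1000000007))
    (List.replicate n 0)

-- ===== PRECONDITION & SPEC =====
-- Pre_ excludes exactly the inputs where A raises IndexError: target2 or recurrence_polynomial shorter than target1.
def Pre_polynomial_multiply (target1 : List Int) (target2 : List Int) (recurrence_polynomial : List Int) : Prop :=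
  target1.length ≤ target2.length ∧ target1.length ≤ recurrence_polynomial.length
instance (target1 : List Int) (target2 : List Int) (recurrence_polynomial : List Int) : Decidable (Pre_polynomial_multiply target1 target2 recurrence_polynomial) := by unfold Pre_polynomial_multiply; infer_instance
def pvWitness_polynomial_multiply : List Int × List Int × List Int := ([1, 2], [3, 4], [1, 1])
def Spec_polynomial_multiply (target1 : List Int) (target2 : List Int) (recurrence_polynomial : List Int) (out : List Int) : Prop := out = polynomial_multiply_alt target1 target2 recurrence_polynomial
instance (target1 : List Int) (target2 : List Int) (recurrence_polynomial : List Int) (out : List Int) : Decidable (Spec_polynomial_multiply target1 target2 recurrence_polynomial out) := by unfold Spec_polynomial_multiply; infer_instance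

-- ===== CLAIM (what is proved, stated in full; the proofs are below) =====
def Claim_equal_polynomial_multiply : Prop := ∀ (target1 : List Int) (target2 : List Int) (recurrence_polynomial : List Int), Dom_polynomial_multiply target1 target2 recurrence_polynomial → Pre_polynomial_multiply target1 target2 recurrence_polynomial → Spec_polynomial_multiply target1 target2 recurrence_polynomial (polynomial_multiply target1 target2 recurrence_polynomial)

-- ===== LEMMAS AND PROOFS =====

-- modulus shorthand and modular-arithmetic facts (proof-only helpers)
def pvEm (x : Int) : Int := x % 1000000007

theorem pvMod_eq (x : Int) : PySem.Int.mod x 1000000007 = pvEm x :=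
  PySem.Int.mod_eq_emod_of_pos (by norm_num)

theorem pvEm_pvEm (x : Int) : pvEm (pvEm x) = pvEm x :=
  Int.emod_emod_of_dvd x dvd_rfl

theorem pvEm_add_left (x y : Int) : pvEm (pvEm x + y) = pvEm (x + y) := by
  unfold pvEm
  rw [Int.add_emod, Int.emod_emod_of_dvd x dvd_rfl, ← Int.add_emod]

-- the common mathematical description A is reduced to
def pvWc (t1 t2 : List Int) (k : Nat) : Int :=
  ((List.range t1.length).map (fun i =>
    if i ≤ k ∧ k - i < t1.length then pvEm (t1.getD i 0 * t2.getD (k - i) 0) else 0)).sum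

def pvCv (t1 t2 : List Int) (k : Nat) : Int := pvEm (pvWc t1 t2 k)

-- fully reduced value of position p (t1.length ≤ p < 2*t1.length), defined top-down
def pvHf (t1 t2 rc : List Int) (p : Nat) : Int :=
  if _h : p < 2 * t1.length then
    pvEm (pvCv t1 t2 p +
      ((List.range (min (p + t1.length) (2 * t1.length - 1) - p)).map (fun u =>
        pvEm (pvHf t1 t2 rc (p + 1 + u) * rc.getD u 0))).sum)
  else 0
termination_by 2 * t1.length - p
decreasing_by omega

-- contributions position p (p ≤ b) has received once positions above b are reduced
def pvSg (t1 t2 rc : List Int) (b p : Nat) : Int :=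
  ((List.range' (b + 1) (min (p + t1.length) (2 * t1.length - 1) + 1 - (b + 1))).map (fun q =>
    pvEm (pvHf t1 t2 rc q * rc.getD (q - 1 - p) 0))).sum

-- state of A's second loop when positions above b remain to be processed
def pvGv (t1 t2 rc : List Int) (b p : Nat) : Int :=
  if b < p then pvHf t1 t2 rc p else pvEm (pvCv t1 t2 p + pvSg t1 t2 rc b p)

-- generic list lemmas
theorem pvGetD_set (r : List Int) (a k : Nat) (v : Int) (ha : a < r.length) :
    (r.set a v).getD k 0 = if a = k then v else r.getD k 0 := by
  simp only [List.getD_eq_getElem?_getD, List.getElem?_set, ha, if_true]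
  split <;> simp

theorem pvFoldl_set_length {α : Type} (l : List α) (κ : List Int → α → Nat) (v : List Int → α → Int) :
    ∀ r : List Int, (l.foldl (fun r x => r.set (κ r x) (v r x)) r).length = r.length := by
  induction l with
  | nil => intro r; rfl
  | cons x xs ih => intro r; simp [List.foldl_cons, ih, List.length_set]

theorem pvFoldl_inner_length {α : Type} (l : List α) (inner : List Int → α → List Int)
    (h : ∀ r x, (inner r x).length = r.length) :
    ∀ r : List Int, (l.foldl inner r).length = r.length := by
  induction l with
  | nil => intro r; rfl
  | cons x xs ih => intro r; rw [List.foldl_cons, ih, h]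

-- ===== loop 1 (convolution) characterization =====
theorem pvInner1 (t1 t2 : List Int) (i : Nat) :
    ∀ (m : Nat) (r : List Int), i + m ≤ r.length → ∀ k : Nat,
    ((List.range m).foldl (fun r j => r.set (i + j)
        (PySem.Int.mod (r.getD (i + j) 0 + PySem.Int.mod (t1.getD i 0 * t2.getD j 0) 1000000007) 1000000007)) r).getD k 0
      = if i ≤ k ∧ k - i < m then pvEm (r.getD k 0 + pvEm (t1.getD i 0 * t2.getD (k - i) 0)) else r.getD k 0 := by
  intro m
  induction m with
  | zero =>
    intro r hm k
    rw [if_neg (by omega)]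
    rfl
  | succ m ih =>
    intro r hm k
    rw [List.range_succ, List.foldl_append, List.foldl_cons, List.foldl_nil]
    have hlen : ((List.range m).foldl (fun r j => r.set (i + j)
        (PySem.Int.mod (r.getD (i + j) 0 + PySem.Int.mod (t1.getD i 0 * t2.getD j 0) 1000000007) 1000000007)) r).length = r.length :=
      pvFoldl_set_length (List.range m) _ _ r
    rw [pvGetD_set _ _ _ _ (by rw [hlen]; omega)]
    by_cases hk : i + m = k
    · rw [if_pos hk, if_pos (by omega)]
      rw [ih r (by omega) (i + m), if_neg (by omega), pvMod_eq, pvMod_eq]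
      have : k - i = m := by omega
      rw [this, ← hk]
    · rw [if_neg hk, ih r (by omega) k]
      by_cases hw : i ≤ k ∧ k - i < m
      · rw [if_pos hw, if_pos (by omega)]
      · rw [if_neg hw, if_neg (by omega)]

theorem pvOuter1 (t1 t2 : List Int) (n : Nat) :
    ∀ (m : Nat), m ≤ n → ∀ k : Nat, k < 2 * n →
    ((List.range m).foldl (fun r i => (List.range n).foldl (fun r j => r.set (i + j)
        (PySem.Int.mod (r.getD (i + j) 0 + PySem.Int.mod (t1.getD i 0 * t2.getD j 0) 1000000007) 1000000007)) r)
      (List.replicate (2 * n) (0:Int))).getD k 0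
      = pvEm (((List.range m).map (fun i =>
          if i ≤ k ∧ k - i < n then pvEm (t1.getD i 0 * t2.getD (k - i) 0) else 0)).sum) := by
  intro m
  induction m with
  | zero =>
    intro _ k hk
    simp [pvEm]
  | succ m ih =>
    intro hm k hk
    rw [List.range_succ, List.foldl_append, List.foldl_cons, List.foldl_nil]
    have hlen : ((List.range m).foldl (fun r i => (List.range n).foldl (fun r j => r.set (i + j)
        (PySem.Int.mod (r.getD (i + j) 0 + PySem.Int.mod (t1.getD i 0 * t2.getD j 0) 1000000007) 1000000007)) r)
        (List.replicate (2 * n) (0:Int))).length = 2 * n := by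
      rw [pvFoldl_inner_length _ _ (fun r x => pvFoldl_set_length (List.range n) _ _ r)]
      exact List.length_replicate
    rw [pvInner1 t1 t2 m n _ (by omega) k, List.map_append, List.sum_append]
    simp only [List.map_cons, List.map_nil, List.sum_cons, List.sum_nil, add_zero]
    by_cases hw : m ≤ k ∧ k - m < n
    · rw [if_pos hw, if_pos hw, ih (by omega) k hk, pvEm_add_left]
    · rw [if_neg hw, if_neg hw, ih (by omega) k hk, add_zero]

-- ===== loop 2 (recurrence reduction) characterization =====
theorem pvHf_eq (t1 t2 rc : List Int) (p : Nat) (hp : p < 2 * t1.length) :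
    pvHf t1 t2 rc p = pvEm (pvCv t1 t2 p +
      ((List.range (min (p + t1.length) (2 * t1.length - 1) - p)).map (fun u =>
        pvEm (pvHf t1 t2 rc (p + 1 + u) * rc.getD u 0))).sum) := by
  rw [pvHf, dif_pos hp]

theorem pvGv_diag (t1 t2 rc : List Int) (b : Nat) (hb : t1.length ≤ b) (hb2 : b < 2 * t1.length) :
    pvEm (pvCv t1 t2 b + pvSg t1 t2 rc b b) = pvHf t1 t2 rc b := by
  rw [pvHf_eq t1 t2 rc b hb2]
  congr 2
  unfold pvSg
  have hcnt : min (b + t1.length) (2 * t1.length - 1) + 1 - (b + 1)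
      = min (b + t1.length) (2 * t1.length - 1) - b := by omega
  rw [hcnt, List.range'_eq_map_range, List.map_map]
  refine congrArg List.sum (List.map_congr_left ?_)
  intro u hu
  simp only [Function.comp_apply]
  have h1 : b + 1 + u - 1 - b = u := by omega
  rw [h1]

theorem pvInner2 (rc : List Int) (i0 : Nat) :
    ∀ (m : Nat) (r : List Int), m ≤ i0 → i0 < r.length → ∀ k : Nat,
    ((PySem.List.pyRange 1 ((m : Int) + 1) 1).foldl (fun r j => r.set ((i0 : Int) - j).toNat
        (PySem.Int.mod (r.getD ((i0 : Int) - j).toNat 0 +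
          PySem.Int.mod (r.getD i0 0 * rc.getD (j - 1).toNat 0) 1000000007) 1000000007)) r).getD k 0
      = if k < i0 ∧ i0 ≤ k + m then pvEm (r.getD k 0 + pvEm (r.getD i0 0 * rc.getD (i0 - 1 - k) 0)) else r.getD k 0 := by
  intro m
  induction m with
  | zero =>
    intro r hm hi k
    rw [PySem.List.pyRange_one_eq_nil (by norm_num), List.foldl_nil, if_neg (by omega)]
  | succ m ih =>
    intro r hm hi k
    have hcast : ((m + 1 : Nat) : Int) + 1 = ((m : Int) + 1) + 1 := by push_cast; ring
    rw [hcast, PySem.List.pyRange_one_succ_right (by omega), List.foldl_append, List.foldl_cons, List.foldl_nil]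
    have hlen : ((PySem.List.pyRange 1 ((m : Int) + 1) 1).foldl (fun r j => r.set ((i0 : Int) - j).toNat
        (PySem.Int.mod (r.getD ((i0 : Int) - j).toNat 0 +
          PySem.Int.mod (r.getD i0 0 * rc.getD (j - 1).toNat 0) 1000000007) 1000000007)) r).length = r.length :=
      pvFoldl_set_length _ _ _ r
    have hkey : ((i0 : Int) - ((m : Int) + 1)).toNat = i0 - (m + 1) := by omega
    have hrcix : (((m : Int) + 1) - 1).toNat = m := by omega
    rw [hkey, hrcix, pvGetD_set _ _ _ _ (by rw [hlen]; omega)]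
    by_cases hk : i0 - (m + 1) = k
    · rw [if_pos hk, if_pos (by omega)]
      rw [ih r (by omega) hi (i0 - (m + 1)), if_neg (by omega),
        ih r (by omega) hi i0, if_neg (by omega), pvMod_eq, pvMod_eq]
      have : i0 - 1 - k = m := by omega
      rw [this, ← hk]
    · rw [if_neg hk, ih r (by omega) hi k]
      by_cases hw : k < i0 ∧ i0 ≤ k + m
      · rw [if_pos hw, if_pos (by omega)]
      · rw [if_neg hw, if_neg (by omega)]

theorem pvOuter2 (t1 t2 rc : List Int) (hn1 : 1 ≤ t1.length) :
    ∀ (m : Nat), m ≤ t1.length → ∀ r : List Int, r.length = 2 * t1.length →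
    (∀ p, p < 2 * t1.length → r.getD p 0 = pvGv t1 t2 rc (t1.length - 1 + m) p) →
    ∀ p, p < 2 * t1.length →
    ((PySem.List.pyRange ((t1.length - 1 + m : Nat) : Int) ((t1.length : Int) - 1) (-1)).foldl (fun r i =>
        (PySem.List.pyRange 1 ((t1.length : Int) + 1) 1).foldl (fun r j =>
        r.set (i - j).toNat (PySem.Int.mod (r.getD (i - j).toNat 0 +
          PySem.Int.mod (r.getD i.toNat 0 * rc.getD (j - 1).toNat 0) 1000000007) 1000000007)) r) r).getD p 0
      = pvGv t1 t2 rc (t1.length - 1) p := by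
  intro m
  induction m with
  | zero =>
    intro _ r _ hstate p hp
    rw [PySem.List.pyRange_neg_one_eq_nil (by omega), List.foldl_nil]
    simpa using hstate p hp
  | succ m ih =>
    intro hm r hrlen hstate p hp
    have hb' : t1.length - 1 + (m + 1) = t1.length + m := by omega
    rw [hb'] at hstate ⊢
    rw [PySem.List.pyRange_neg_one_cons (by omega), List.foldl_cons]
    simp only [Int.toNat_natCast]
    have hdiag : r.getD (t1.length + m) 0 = pvHf t1 t2 rc (t1.length + m) := by
      rw [hstate (t1.length + m) (by omega)]
      unfold pvGv
      rw [if_neg (by omega)]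
      exact pvGv_diag t1 t2 rc (t1.length + m) (by omega) (by omega)
    have hstate' : ∀ q, q < 2 * t1.length →
        ((PySem.List.pyRange 1 ((t1.length : Int) + 1) 1).foldl (fun r j =>
          r.set (((t1.length + m : Nat) : Int) - j).toNat (PySem.Int.mod (r.getD (((t1.length + m : Nat) : Int) - j).toNat 0 +
            PySem.Int.mod (r.getD (t1.length + m) 0 * rc.getD (j - 1).toNat 0) 1000000007) 1000000007)) r).getD q 0
        = pvGv t1 t2 rc (t1.length - 1 + m) q := by
      intro q hq
      have hcast : ((t1.length : Int) + 1) = ((t1.length : Nat) : Int) + 1 := by norm_num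
      rw [pvInner2 rc (t1.length + m) t1.length r (by omega) (by omega) q]
      by_cases hw : q < t1.length + m ∧ t1.length + m ≤ q + t1.length
      · rw [if_pos hw, hdiag, hstate q hq]
        unfold pvGv
        rw [if_neg (by omega), if_neg (by omega), pvEm_add_left]
        have hsg : pvSg t1 t2 rc (t1.length - 1 + m) q
            = pvEm (pvHf t1 t2 rc (t1.length + m) * rc.getD (t1.length + m - 1 - q) 0)
              + pvSg t1 t2 rc (t1.length + m) q := by
          unfold pvSg
          have hcnt : min (q + t1.length) (2 * t1.length - 1) + 1 - (t1.length - 1 + m + 1)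
              = (min (q + t1.length) (2 * t1.length - 1) + 1 - (t1.length + m + 1)) + 1 := by omega
          have hstart : t1.length - 1 + m + 1 = t1.length + m := by omega
          rw [hcnt, hstart, List.range'_succ, List.map_cons, List.sum_cons]
        rw [hsg]
        congr 1
        ring
      · rw [if_neg hw, hstate q hq]
        unfold pvGv
        by_cases hq2 : t1.length + m ≤ q
        · rcases Nat.eq_or_lt_of_le hq2 with hq3 | hq3
          · rw [if_neg (by omega), if_pos (by omega), ← hq3]
            exact pvGv_diag t1 t2 rc (t1.length + m) (by omega) (by omega)
          · rw [if_pos (by omega), if_pos (by omega)]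
        · rw [if_neg (by omega), if_neg (by omega)]
          have hq5 : q < m := by
            rcases Decidable.not_and_iff_or_not.mp hw with h | h <;> omega
          have hsg : pvSg t1 t2 rc (t1.length + m) q = pvSg t1 t2 rc (t1.length - 1 + m) q := by
            unfold pvSg
            have e1 : min (q + t1.length) (2 * t1.length - 1) + 1 - (t1.length + m + 1) = 0 := by omega
            have e2 : min (q + t1.length) (2 * t1.length - 1) + 1 - (t1.length - 1 + m + 1) = 0 := by omega
            rw [e1, e2]
            rfl
          rw [hsg]
    have hlen' : ((PySem.List.pyRange 1 ((t1.length : Int) + 1) 1).foldl (fun r j =>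
          r.set (((t1.length + m : Nat) : Int) - j).toNat (PySem.Int.mod (r.getD (((t1.length + m : Nat) : Int) - j).toNat 0 +
            PySem.Int.mod (r.getD (t1.length + m) 0 * rc.getD (j - 1).toNat 0) 1000000007) 1000000007)) r).length = 2 * t1.length := by
      rw [pvFoldl_set_length]; exact hrlen
    have hcast2 : ((t1.length + m : Nat) : Int) - 1 = ((t1.length - 1 + m : Nat) : Int) := by omega
    rw [hcast2]
    exact ih (by omega) _ hlen' hstate' p hp

theorem pvGet_eq_getD (l : List Int) (k : Nat) (h : k < l.length) : l[k] = l.getD k 0 :=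
  (List.getD_eq_getElem l 0 h).symm

-- A's output, characterized: entry k is the reduced-convolution value pvCv k + pvSg (n-1) k, mod MOD
theorem pvA_char (t1 t2 rc : List Int) (hn1 : 1 ≤ t1.length) :
    polynomial_multiply t1 t2 rc
      = (List.range t1.length).map (fun k => pvEm (pvCv t1 t2 k + pvSg t1 t2 rc (t1.length - 1) k)) := by
  simp only [polynomial_multiply]
  set r1 : List Int := (List.range t1.length).foldl (fun r i => (List.range t1.length).foldl (fun r j =>
      r.set (i + j) (PySem.Int.mod (r.getD (i + j) 0 + PySem.Int.mod (t1.getD i 0 * t2.getD j 0) 1000000007) 1000000007)) r)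
      (List.replicate (2 * t1.length) 0) with hr1def
  have hr1len : r1.length = 2 * t1.length := by
    rw [hr1def, pvFoldl_inner_length _ _ (fun r x => pvFoldl_set_length _ _ _ r)]
    exact List.length_replicate
  have hr1 : ∀ p, p < 2 * t1.length → r1.getD p 0 = pvCv t1 t2 p := by
    intro p hp
    rw [hr1def, pvOuter1 t1 t2 t1.length t1.length le_rfl p hp]
    rfl
  have hinit : ∀ p, p < 2 * t1.length → r1.getD p 0 = pvGv t1 t2 rc (t1.length - 1 + t1.length) p := by
    intro p hp
    rw [hr1 p hp]
    unfold pvGv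
    rw [if_neg (by omega)]
    unfold pvSg
    have e : min (p + t1.length) (2 * t1.length - 1) + 1 - (t1.length - 1 + t1.length + 1) = 0 := by omega
    rw [e]
    simp only [List.range'_zero, List.map_nil, List.sum_nil, add_zero]
    unfold pvCv
    rw [pvEm_pvEm]
  have ecast : (2 * ((t1.length : Nat) : Int) - 1) = ((t1.length - 1 + t1.length : Nat) : Int) := by omega
  rw [ecast]
  set s2 : List Int := (PySem.List.pyRange ((t1.length - 1 + t1.length : Nat) : Int) ((t1.length : Int) - 1) (-1)).foldl (fun r i =>
      (PySem.List.pyRange 1 ((t1.length : Int) + 1) 1).foldl (fun r j =>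
      r.set (i - j).toNat (PySem.Int.mod (r.getD (i - j).toNat 0 +
        PySem.Int.mod (r.getD i.toNat 0 * rc.getD (j - 1).toNat 0) 1000000007) 1000000007)) r) r1 with hs2def
  have hs2len : s2.length = 2 * t1.length := by
    rw [hs2def, pvFoldl_inner_length _ _ (fun r x => pvFoldl_set_length _ _ _ r)]
    exact hr1len
  have hmain : ∀ p, p < 2 * t1.length → s2.getD p 0 = pvGv t1 t2 rc (t1.length - 1) p := by
    intro p hp
    rw [hs2def]
    exact pvOuter2 t1 t2 rc hn1 t1.length le_rfl r1 hr1len hinit p hp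
  refine List.ext_getElem ?_ ?_
  · rw [List.length_take, List.length_map, List.length_range, hs2len]
    omega
  · intro k hk1 hk2
    rw [List.length_map, List.length_range] at hk2
    rw [List.getElem_take, List.getElem_map, List.getElem_range,
      pvGet_eq_getD s2 k (by rw [hs2len]; omega), hmain k (by omega)]
    unfold pvGv
    rw [if_neg (by omega)]

-- ===== cast into ZMod 1000000007: shared residue arithmetic =====
def pvC (l : List Int) (j : Nat) : ZMod 1000000007 := ((l.getD j 0 : Int) : ZMod 1000000007)

theorem pvCast_em (x : Int) : ((pvEm x : Int) : ZMod 1000000007) = (x : ZMod 1000000007) := by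
  unfold pvEm
  rw [Int.emod_def]
  push_cast
  have h : ((1000000007 : ZMod 1000000007)) = 0 := by
    have h0 := ZMod.natCast_self 1000000007
    exact_mod_cast h0
  rw [h]
  ring

theorem pvEm_val (x : Int) : pvEm x = (((x : ZMod 1000000007).val : Nat) : Int) := by
  haveI : NeZero (1000000007 : Nat) := ⟨by norm_num⟩
  rw [ZMod.val_intCast]
  unfold pvEm
  norm_num

theorem pvValCast (a : ZMod 1000000007) : (((a.val : Nat)) : ZMod 1000000007) = a := by
  haveI : NeZero (1000000007 : Nat) := ⟨by norm_num⟩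
  exact ZMod.natCast_rightInverse a

theorem pvCast_sum {α : Type} (l : List α) (f : α → Int) :
    (((l.map f).sum : Int) : ZMod 1000000007) = (l.map (fun x => ((f x : Int) : ZMod 1000000007))).sum := by
  induction l with
  | nil => simp
  | cons a t ih => simp only [List.map_cons, List.sum_cons]; rw [Int.cast_add, ih]

theorem pvSumK_add {α : Type} (l : List α) (f g : α → ZMod 1000000007) :
    (l.map (fun x => f x + g x)).sum = (l.map f).sum + (l.map g).sum := by
  induction l with
  | nil => simp
  | cons a t ih => simp only [List.map_cons, List.sum_cons, ih]; ring

-- ===== abstract residue-level spec: top-down reduction (hfZ) and fully reduced entries (outZ) =====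
def hfZ (n : Nat) (cv : Nat → ZMod 1000000007) (rc : Nat → ZMod 1000000007) (p : Nat) : ZMod 1000000007 :=
  if _h : p < 2 * n then
    cv p + ((List.range (min (p + n) (2 * n - 1) - p)).map (fun u =>
      hfZ n cv rc (p + 1 + u) * rc u)).sum
  else 0
termination_by 2 * n - p
decreasing_by omega

def outZ (n : Nat) (cv : Nat → ZMod 1000000007) (rc : Nat → ZMod 1000000007) (p : Nat) : ZMod 1000000007 :=
  cv p + ((List.range' (max n (p + 1)) (min (p + n) (2 * n - 1) + 1 - max n (p + 1))).map (fun q =>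
    hfZ n cv rc q * rc (q - 1 - p))).sum

def pvShf (cv : Nat → ZMod 1000000007) (q : Nat) : ZMod 1000000007 :=
  if q = 0 then 0 else cv (q - 1)

theorem hfZ_out (n : Nat) (cv rc : Nat → ZMod 1000000007) (p : Nat) (hp : n ≤ p) (hp2 : p < 2 * n) :
    hfZ n cv rc p = outZ n cv rc p := by
  rw [hfZ, dif_pos hp2, outZ]
  have hmax : max n (p + 1) = p + 1 := by omega
  have hcnt : min (p + n) (2 * n - 1) + 1 - (p + 1) = min (p + n) (2 * n - 1) - p := by omega
  rw [hmax, hcnt, List.range'_eq_map_range, List.map_map]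
  congr 1
  refine congrArg List.sum (List.map_congr_left ?_)
  intro u _
  simp only [Function.comp_apply]
  have : p + 1 + u - 1 - p = u := by omega
  rw [this]

theorem hfZ_add (n : Nat) (cv1 cv2 rc : Nat → ZMod 1000000007) :
    ∀ m p, 2 * n - p ≤ m →
    hfZ n (fun q => cv1 q + cv2 q) rc p = hfZ n cv1 rc p + hfZ n cv2 rc p := by
  intro m
  induction m with
  | zero =>
    intro p hp
    rw [hfZ, hfZ, hfZ, dif_neg (by omega), dif_neg (by omega), dif_neg (by omega)]
    ring
  | succ m ih =>
    intro p hp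
    by_cases h : p < 2 * n
    · rw [hfZ, hfZ, hfZ, dif_pos h, dif_pos h, dif_pos h]
      have hmap : (List.range (min (p + n) (2 * n - 1) - p)).map (fun u =>
          hfZ n (fun q => cv1 q + cv2 q) rc (p + 1 + u) * rc u)
          = (List.range (min (p + n) (2 * n - 1) - p)).map (fun u =>
            hfZ n cv1 rc (p + 1 + u) * rc u + hfZ n cv2 rc (p + 1 + u) * rc u) := by
        refine List.map_congr_left ?_
        intro u _
        rw [ih (p + 1 + u) (by omega)]
        ring
      rw [hmap, pvSumK_add]
      ring
    · rw [hfZ, hfZ, hfZ, dif_neg h, dif_neg h, dif_neg h]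
      ring

theorem hfZ_low (n : Nat) (cv rc : Nat → ZMod 1000000007) (hcv : ∀ q, n ≤ q → cv q = 0) :
    ∀ m p, 2 * n - p ≤ m → n ≤ p → hfZ n cv rc p = 0 := by
  intro m
  induction m with
  | zero =>
    intro p hp hnp
    rw [hfZ, dif_neg (by omega)]
  | succ m ih =>
    intro p hp hnp
    by_cases h : p < 2 * n
    · rw [hfZ, dif_pos h, hcv p hnp]
      have hmap : (List.range (min (p + n) (2 * n - 1) - p)).map (fun u =>
          hfZ n cv rc (p + 1 + u) * rc u)
          = (List.range (min (p + n) (2 * n - 1) - p)).map (fun _ => (0 : ZMod 1000000007)) := by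
        refine List.map_congr_left ?_
        intro u _
        rw [ih (p + 1 + u) (by omega) (by omega)]
        ring
      rw [hmap]
      simp
    · rw [hfZ, dif_neg h]

theorem outZ_add (n : Nat) (cv1 cv2 rc : Nat → ZMod 1000000007) (p : Nat) :
    outZ n (fun q => cv1 q + cv2 q) rc p = outZ n cv1 rc p + outZ n cv2 rc p := by
  unfold outZ
  have hmap : (List.range' (max n (p + 1)) (min (p + n) (2 * n - 1) + 1 - max n (p + 1))).map (fun q =>
      hfZ n (fun q => cv1 q + cv2 q) rc q * rc (q - 1 - p))
      = (List.range' (max n (p + 1)) (min (p + n) (2 * n - 1) + 1 - max n (p + 1))).map (fun q =>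
        hfZ n cv1 rc q * rc (q - 1 - p) + hfZ n cv2 rc q * rc (q - 1 - p)) := by
    refine List.map_congr_left ?_
    intro q _
    rw [hfZ_add n cv1 cv2 rc (2 * n - q) q le_rfl]
    ring
  rw [hmap, pvSumK_add]
  ring

theorem outZ_low (n : Nat) (cv rc : Nat → ZMod 1000000007) (hcv : ∀ q, n ≤ q → cv q = 0) (p : Nat) :
    outZ n cv rc p = cv p := by
  unfold outZ
  have hmap : (List.range' (max n (p + 1)) (min (p + n) (2 * n - 1) + 1 - max n (p + 1))).map (fun q =>
      hfZ n cv rc q * rc (q - 1 - p))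
      = (List.range' (max n (p + 1)) (min (p + n) (2 * n - 1) + 1 - max n (p + 1))).map (fun _ => (0 : ZMod 1000000007)) := by
    refine List.map_congr_left ?_
    intro q hq
    rw [List.mem_range'_1] at hq
    rw [hfZ_low n cv rc hcv (2 * n - q) q le_rfl (by omega)]
    ring
  rw [hmap]
  simp

theorem hfZ_shift (n : Nat) (cv rc : Nat → ZMod 1000000007) (hn : 1 ≤ n) (htop : cv (2 * n - 1) = 0) :
    ∀ m p, 2 * n - p ≤ m → n ≤ p → p < 2 * n →
    hfZ n (pvShf cv) rc p = outZ n cv rc (p - 1) := by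
  intro m
  induction m with
  | zero =>
    intro p hp hnp h2p
    omega
  | succ m ih =>
    intro p hp hnp h2p
    rw [hfZ, dif_pos h2p]
    have hshf : pvShf cv p = cv (p - 1) := by
      unfold pvShf
      rw [if_neg (by omega)]
    have hmin1 : min (p + n) (2 * n - 1) = 2 * n - 1 := by omega
    -- LHS inner sum: terms hfZ (pvShf cv) (p+1+u) = outZ cv (p+u), u < 2n-1-p
    have hmapL : (List.range (min (p + n) (2 * n - 1) - p)).map (fun u =>
        hfZ n (pvShf cv) rc (p + 1 + u) * rc u)
        = (List.range (2 * n - 1 - p)).map (fun u => hfZ n cv rc (p + u) * rc u) := by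
      rw [hmin1]
      refine List.map_congr_left ?_
      intro u hu
      rw [List.mem_range] at hu
      rw [ih (p + 1 + u) (by omega) (by omega) (by omega)]
      have : p + 1 + u - 1 = p + u := by omega
      rw [this, ← hfZ_out n cv rc (p + u) (by omega) (by omega)]
    rw [hshf, hmapL]
    -- RHS: outZ cv (p-1) over range' p (2n-p); split off its last element q = 2n-1 (which is zero)
    rw [outZ]
    have hmax : max n (p - 1 + 1) = p := by omega
    rw [hmax]
    have hcnt : min (p - 1 + n) (2 * n - 1) + 1 - p = 2 * n - p := by omega
    rw [hcnt]
    have hsplit : (2 * n - p) = (2 * n - 1 - p) + 1 := by omega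
    rw [hsplit, List.range'_concat, List.map_append, List.sum_append]
    have hlast : ((([p + 1 * (2 * n - 1 - p)]).map (fun q => hfZ n cv rc q * rc (q - 1 - (p - 1)))).sum : ZMod 1000000007) = 0 := by
      simp only [List.map_cons, List.map_nil, List.sum_cons, List.sum_nil, add_zero]
      have hq : p + 1 * (2 * n - 1 - p) = 2 * n - 1 := by omega
      rw [hq, hfZ, dif_pos (by omega : 2 * n - 1 < 2 * n)]
      have hz : min (2 * n - 1 + n) (2 * n - 1) - (2 * n - 1) = 0 := by omega
      rw [hz, htop]
      simp
    rw [hlast, add_zero, List.range'_eq_map_range, List.map_map]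
    congr 1
    refine congrArg List.sum (List.map_congr_left ?_)
    intro u _
    simp only [Function.comp_apply]
    have : p + u - 1 - (p - 1) = u := by omega
    rw [this]

theorem outZ_shift (n : Nat) (cv rc : Nat → ZMod 1000000007) (hn : 1 ≤ n) (htop : cv (2 * n - 1) = 0)
    (k : Nat) (hk : k < n) :
    outZ n (pvShf cv) rc k
      = (if k = 0 then 0 else outZ n cv rc (k - 1)) + outZ n cv rc (n - 1) * rc (n - 1 - k) := by
  rw [outZ]
  have hmax : max n (k + 1) = n := by omega
  rw [hmax]
  have hcnt : min (k + n) (2 * n - 1) + 1 - n = k + 1 := by omega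
  rw [hcnt, List.range'_succ, List.map_cons, List.sum_cons]
  have hfirst : hfZ n (pvShf cv) rc n * rc (n - 1 - k) = outZ n cv rc (n - 1) * rc (n - 1 - k) := by
    rw [hfZ_shift n cv rc hn htop (2 * n - n) n le_rfl le_rfl (by omega)]
  have hrest : ((List.range' (n + 1) k).map (fun q => hfZ n (pvShf cv) rc q * rc (q - 1 - k))).sum
      = (if k = 0 then 0 else ((List.range' n k).map (fun q => hfZ n cv rc q * rc (q - 1 - (k - 1)))).sum) := by
    by_cases hk0 : k = 0
    · subst hk0; simp
    · rw [if_neg hk0, List.range'_eq_map_range, List.range'_eq_map_range, List.map_map, List.map_map]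
      refine congrArg List.sum (List.map_congr_left ?_)
      intro u hu
      rw [List.mem_range] at hu
      simp only [Function.comp_apply]
      rw [hfZ_shift n cv rc hn htop (2 * n - (n + 1 + u)) (n + 1 + u) le_rfl (by omega) (by omega)]
      have e1 : n + 1 + u - 1 = n + u := by omega
      have e2 : n + u - k = n + u - 1 - (k - 1) := by omega
      rw [e1, e2, ← hfZ_out n cv rc (n + u) (by omega) (by omega)]
  rw [hfirst, hrest]
  by_cases hk0 : k = 0
  · subst hk0
    have hshf0 : pvShf cv 0 = 0 := by unfold pvShf; rw [if_pos rfl]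
    rw [hshf0]
    simp
  · rw [if_neg hk0, if_neg hk0]
    have hshf : pvShf cv k = cv (k - 1) := by unfold pvShf; rw [if_neg hk0]
    have hout : outZ n cv rc (k - 1)
        = cv (k - 1) + ((List.range' n k).map (fun q => hfZ n cv rc q * rc (q - 1 - (k - 1)))).sum := by
      rw [outZ]
      have hmax2 : max n (k - 1 + 1) = n := by omega
      rw [hmax2]
      have hcnt2 : min (k - 1 + n) (2 * n - 1) + 1 - n = k := by omega
      rw [hcnt2]
    rw [hshf, hout]
    ring

-- the Horner-state polynomial: coefficients of (Σ_{j<i} t1[n-i+j] x^j) * t2, as residues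
def pvCvS (t1c t2c : Nat → ZMod 1000000007) (n i q : Nat) : ZMod 1000000007 :=
  ((List.range i).map (fun j =>
    if j ≤ q ∧ q - j < n then t1c (n - i + j) * t2c (q - j) else 0)).sum

theorem pvCvS_succ (t1c t2c : Nat → ZMod 1000000007) (n i : Nat) (hi : i < n) (q : Nat) :
    pvCvS t1c t2c n (i + 1) q
      = pvShf (pvCvS t1c t2c n i) q + t1c (n - 1 - i) * (if q < n then t2c q else 0) := by
  unfold pvCvS
  rw [List.range_succ_eq_map, List.map_cons, List.sum_cons, List.map_map]
  have hhead : (if 0 ≤ q ∧ q - 0 < n then t1c (n - (i + 1) + 0) * t2c (q - 0) else 0)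
      = t1c (n - 1 - i) * (if q < n then t2c q else 0) := by
    have e : n - (i + 1) + 0 = n - 1 - i := by omega
    by_cases hq : q < n
    · rw [if_pos (by omega), if_pos hq, e]; simp
    · rw [if_neg (by omega), if_neg hq]; ring
  rw [hhead]
  have htail : ((List.range i).map ((fun j =>
      if j ≤ q ∧ q - j < n then t1c (n - (i + 1) + j) * t2c (q - j) else 0) ∘ Nat.succ)).sum
      = pvShf (pvCvS t1c t2c n i) q := by
    by_cases hq0 : q = 0
    · subst hq0
      have hmap : (List.range i).map ((fun j =>
          if j ≤ 0 ∧ 0 - j < n then t1c (n - (i + 1) + j) * t2c (0 - j) else 0) ∘ Nat.succ)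
          = (List.range i).map (fun _ => (0 : ZMod 1000000007)) := by
        refine List.map_congr_left ?_
        intro j _
        simp only [Function.comp_apply]
        rw [if_neg (by omega)]
      rw [hmap]
      unfold pvShf
      simp
    · unfold pvShf
      rw [if_neg hq0]
      unfold pvCvS
      refine congrArg List.sum (List.map_congr_left ?_)
      intro j _
      simp only [Function.comp_apply, Nat.succ_eq_add_one]
      by_cases hc : j + 1 ≤ q ∧ q - (j + 1) < n
      · rw [if_pos hc, if_pos (by omega)]
        have e1 : n - (i + 1) + (j + 1) = n - i + j := by omega
        have e2 : q - (j + 1) = q - 1 - j := by omega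
        rw [e1, e2]
      · rw [if_neg hc, if_neg (by omega)]
  rw [htail, add_comm]
  rfl

theorem pvCvS_high (t1c t2c : Nat → ZMod 1000000007) (n i q : Nat) (hq : n + i ≤ q + 1) :
    pvCvS t1c t2c n i q = 0 := by
  unfold pvCvS
  have hmap : (List.range i).map (fun j =>
      if j ≤ q ∧ q - j < n then t1c (n - i + j) * t2c (q - j) else 0)
      = (List.range i).map (fun _ => (0 : ZMod 1000000007)) := by
    refine List.map_congr_left ?_
    intro j hj
    rw [List.mem_range] at hj
    rw [if_neg (by omega)]
  rw [hmap]
  simp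

-- one Horner step, at the residue level
theorem pvStepZ (t1c t2c rc : Nat → ZMod 1000000007) (n i k : Nat)
    (hi : i < n) (hk : k < n) :
    outZ n (pvCvS t1c t2c n (i + 1)) rc k
      = (if k = 0 then 0 else outZ n (pvCvS t1c t2c n i) rc (k - 1))
        + outZ n (pvCvS t1c t2c n i) rc (n - 1) * rc (n - 1 - k)
        + t1c (n - 1 - i) * t2c k := by
  have hn : 1 ≤ n := by omega
  have hfun : pvCvS t1c t2c n (i + 1)
      = fun q => pvShf (pvCvS t1c t2c n i) q + t1c (n - 1 - i) * (if q < n then t2c q else 0) :=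
    funext (pvCvS_succ t1c t2c n i hi)
  rw [hfun, outZ_add, outZ_shift n (pvCvS t1c t2c n i) rc hn
      (pvCvS_high t1c t2c n i (2 * n - 1) (by omega)) k hk,
    outZ_low n (fun q => t1c (n - 1 - i) * (if q < n then t2c q else 0)) rc
      (by
        intro q hq
        show t1c (n - 1 - i) * (if q < n then t2c q else 0) = 0
        rw [if_neg (by omega)]
        ring) k,
    if_pos hk]

-- ===== casting A's characterization to the residue level =====
theorem pvCv_cast (t1 t2 : List Int) (k : Nat) :
    ((pvCv t1 t2 k : Int) : ZMod 1000000007) = pvCvS (pvC t1) (pvC t2) t1.length t1.length k := by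
  unfold pvCv
  rw [pvCast_em]
  unfold pvWc pvCvS
  rw [pvCast_sum]
  refine congrArg List.sum (List.map_congr_left ?_)
  intro i _
  by_cases hc : i ≤ k ∧ k - i < t1.length
  · rw [if_pos hc, if_pos hc, pvCast_em]
    push_cast
    unfold pvC
    have : t1.length - t1.length + i = i := by omega
    rw [this]
  · rw [if_neg hc, if_neg hc]
    simp

theorem pvHf_cast (t1 t2 rc : List Int) :
    ∀ m p, 2 * t1.length - p ≤ m →
    ((pvHf t1 t2 rc p : Int) : ZMod 1000000007)
      = hfZ t1.length (pvCvS (pvC t1) (pvC t2) t1.length t1.length) (pvC rc) p := by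
  intro m
  induction m with
  | zero =>
    intro p hp
    rw [pvHf, hfZ, dif_neg (by omega), dif_neg (by omega)]
    simp
  | succ m ih =>
    intro p hp
    by_cases h : p < 2 * t1.length
    · rw [pvHf, hfZ, dif_pos h, dif_pos h, pvCast_em, Int.cast_add, pvCv_cast, pvCast_sum]
      congr 1
      refine congrArg List.sum (List.map_congr_left ?_)
      intro u _
      rw [pvCast_em, Int.cast_mul, ih (p + 1 + u) (by omega)]
      rfl
    · rw [pvHf, hfZ, dif_neg h, dif_neg h]
      simp

theorem pvA_entry_cast (t1 t2 rc : List Int) (hn : 1 ≤ t1.length) (k : Nat) (hk : k < t1.length) :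
    (((pvCv t1 t2 k + pvSg t1 t2 rc (t1.length - 1) k : Int)) : ZMod 1000000007)
      = outZ t1.length (pvCvS (pvC t1) (pvC t2) t1.length t1.length) (pvC rc) k := by
  push_cast
  rw [pvCv_cast, outZ]
  congr 1
  unfold pvSg
  rw [pvCast_sum]
  have hmax : max t1.length (k + 1) = t1.length - 1 + 1 := by omega
  rw [hmax]
  have hcnt : min (k + t1.length) (2 * t1.length - 1) + 1 - (t1.length - 1 + 1)
      = min (k + t1.length) (2 * t1.length - 1) + 1 - (t1.length - 1 + 1) := rfl
  refine congrArg List.sum (List.map_congr_left ?_)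
  intro q _
  rw [pvCast_em]
  push_cast
  rw [pvHf_cast t1 t2 rc (2 * t1.length - q) q le_rfl]
  rfl

-- ===== B's fold, characterized by the Horner invariant =====
theorem pvRev_eq (l : List Int) :
    l.reverse = (List.range l.length).map (fun m => l.getD (l.length - 1 - m) 0) := by
  refine List.ext_getElem (by simp) ?_
  intro i h1 h2
  rw [List.length_reverse] at h1
  rw [List.getElem_reverse, List.getElem_map, List.getElem_range,
    pvGet_eq_getD l (l.length - 1 - i) (by omega)]

theorem pvMapRange_getD (n k : Nat) (f : Nat → Int) (hk : k < n) :
    (((List.range n).map f).getD k 0) = f k := by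
  rw [List.getD_eq_getElem?_getD, List.getElem?_map, List.getElem?_range hk]
  simp

theorem pvBfold (t1 t2 rc : List Int) (hn : 1 ≤ t1.length) :
    ∀ i, i ≤ t1.length →
    (((List.range i).foldl (fun state m =>
        (List.range t1.length).map (fun k =>
          PySem.Int.mod ((if 0 < k then state.getD (k - 1) 0 else 0)
            + state.getD (t1.length - 1) 0 * rc.getD (t1.length - 1 - k) 0
            + t1.getD (t1.length - 1 - m) 0 * t2.getD k 0) 1000000007))
        (List.replicate t1.length 0)).length = t1.length)
    ∧ ∀ k, k < t1.length →
      ((List.range i).foldl (fun state m =>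
        (List.range t1.length).map (fun k =>
          PySem.Int.mod ((if 0 < k then state.getD (k - 1) 0 else 0)
            + state.getD (t1.length - 1) 0 * rc.getD (t1.length - 1 - k) 0
            + t1.getD (t1.length - 1 - m) 0 * t2.getD k 0) 1000000007))
        (List.replicate t1.length 0)).getD k 0
      = (((outZ t1.length (pvCvS (pvC t1) (pvC t2) t1.length i) (pvC rc) k).val : Nat) : Int) := by
  intro i
  induction i with
  | zero =>
    intro _
    constructor
    · rw [List.range_zero, List.foldl_nil]
      simp
    · intro k hk
      rw [List.range_zero, List.foldl_nil, List.getD_eq_getElem?_getD, List.getElem?_replicate]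
      have hout : outZ t1.length (pvCvS (pvC t1) (pvC t2) t1.length 0) (pvC rc) k = 0 := by
        rw [outZ_low t1.length _ (pvC rc) (by
          intro q _
          unfold pvCvS
          simp) k]
        unfold pvCvS
        simp
      rw [hout]
      simp [hk]
  | succ i ih =>
    intro hi
    obtain ⟨ihlen, ihval⟩ := ih (by omega)
    constructor
    · rw [List.range_succ, List.foldl_append, List.foldl_cons, List.foldl_nil]
      simp
    · intro k hk
      rw [List.range_succ, List.foldl_append, List.foldl_cons, List.foldl_nil,
        pvMapRange_getD _ k _ hk, pvMod_eq]
      rw [pvEm_val]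
      congr 2
      push_cast
      rw [ihval (t1.length - 1) (by omega)]
      by_cases hk0 : k = 0
      · subst hk0
        rw [if_neg (by omega)]
        rw [pvStepZ (pvC t1) (pvC t2) (pvC rc) t1.length i 0 (by omega) (by omega), if_pos rfl]
        push_cast
        rw [pvValCast]
        unfold pvC
        ring
      · rw [if_pos (by omega), ihval (k - 1) (by omega)]
        rw [pvStepZ (pvC t1) (pvC t2) (pvC rc) t1.length i k (by omega) hk, if_neg hk0]
        push_cast
        rw [pvValCast, pvValCast]
        unfold pvC
        ring

-- ===== main equivalence =====
theorem pvMain (t1 t2 rc : List Int) :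
    polynomial_multiply t1 t2 rc = polynomial_multiply_alt t1 t2 rc := by
  by_cases hn : t1.length = 0
  · have ht1 : t1 = [] := List.length_eq_zero_iff.mp hn
    subst ht1
    simp [polynomial_multiply, polynomial_multiply_alt]
  · have hn1 : 1 ≤ t1.length := by omega
    rw [pvA_char t1 t2 rc hn1]
    simp only [polynomial_multiply_alt]
    rw [pvRev_eq t1, List.foldl_map]
    obtain ⟨hblen, hbval⟩ := pvBfold t1 t2 rc hn1 t1.length le_rfl
    refine List.ext_getElem (by rw [List.length_map, List.length_range, hblen]) ?_
    intro k hk1 hk2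
    rw [List.length_map, List.length_range] at hk1
    rw [List.getElem_map, List.getElem_range,
      pvGet_eq_getD _ k (by rw [hblen]; omega), hbval k hk1,
      pvEm_val, pvA_entry_cast t1 t2 rc hn1 k hk1]

-- ===== VERDICT (by name: the statement is the Claim_ definition above) =====
theorem polynomial_multiply_spec : Claim_equal_polynomial_multiply := by
  intro t1 t2 rc _hdom _hpre
  unfold Spec_polynomial_multiply
  exact pvMain t1 t2 rc
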